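-- pv_equiv track=rewrite | github.com/thiagopelizoni/ProjectEuler | src/problem_250.py | compute_monomial_power
-- ===== SOURCE A (Python) =====
-- from typing import List, Tuple
--
-- def modular_polynomial_multiply(
--     poly_a: List[int], poly_b: List[int], modulus: int
-- ) -> List[int]:
--     size = len(poly_a)
--     result = [0] * size
--     for i in range(size):
--         coeff_a = poly_a[i]
--         if coeff_a == 0:
--             continue
--         for j in range(size):
--             coeff_b = poly_b[j]
--             if coeff_b == 0:
--                 continue
--             k = (i + j) % size
--             term = coeff_a * coeff_b
--             result[k] = (result[k] + term) % modulus
--     return result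
--
-- def compute_monomial_power(
--     residue: int, exponent: int, size: int, modulus: int
-- ) -> List[int]:
--     result = [0] * size
--     result[0] = 1
--     base = [0] * size
--     base[0] = 1
--     base[residue] += 1
--     current_exponent = exponent
--     while current_exponent > 0:
--         if current_exponent % 2 == 1:
--             result = modular_polynomial_multiply(result, base, modulus)
--         base = modular_polynomial_multiply(base, base, modulus)
--         current_exponent //= 2
--     return result
-- ===== SOURCE B (Python) =====
-- def compute_monomial_power(residue, exponent, size, modulus):
--     result = [0] * size
--     result[0] = 1
--     if exponent <= 0:
--         return result
--     coeffs = [0] * size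
--     c = 1  # binomial coefficient C(exponent, k), maintained exactly
--     for k in range(exponent + 1):
--         pos = (k * residue) % size
--         coeffs[pos] = (coeffs[pos] + c) % modulus
--         c = c * (exponent - k) // (k + 1)
--     return coeffs
-- ===== Notes on version B (the rewrite author's own statement) =====
-- stated objective: faster
-- what changed: A computes (1+x^residue)^exponent by square-and-multiply with O(size^2) cyclic polynomial multiplications; B expands the binomial directly, accumulating C(exponent,k) mod modulus (maintained incrementally by c = c*(n-k)//(k+1)) into position (k*residue) % size in a single pass, with no polynomial multiplication at all.
import Mathlib
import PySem

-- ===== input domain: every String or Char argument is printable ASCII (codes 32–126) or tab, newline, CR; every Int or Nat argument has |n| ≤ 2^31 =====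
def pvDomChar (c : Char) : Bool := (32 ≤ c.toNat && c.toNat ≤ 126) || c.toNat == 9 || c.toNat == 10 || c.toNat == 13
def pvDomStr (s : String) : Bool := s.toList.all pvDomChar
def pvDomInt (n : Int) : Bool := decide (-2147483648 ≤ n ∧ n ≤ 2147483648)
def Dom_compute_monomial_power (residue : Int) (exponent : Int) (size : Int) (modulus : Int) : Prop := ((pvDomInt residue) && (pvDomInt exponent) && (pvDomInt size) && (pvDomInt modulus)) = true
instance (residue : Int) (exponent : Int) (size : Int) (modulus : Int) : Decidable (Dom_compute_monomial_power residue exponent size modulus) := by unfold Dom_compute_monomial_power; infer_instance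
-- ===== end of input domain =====

-- B replaces A's square-and-multiply over O(size^2) cyclic convolutions by a single direct
-- binomial expansion of (1+x^residue)^exponent, accumulating C(exponent,k) mod modulus into
-- the wrapped position (k*residue) % size; objective: faster (no polynomial multiplication).


-- ===== PORT A =====
def modular_polynomial_multiply (poly_a : List Int) (poly_b : List Int) (modulus : Int) : List Int :=
  let size : Int := (poly_a.length : Int)
  (PySem.List.pyRange 0 size 1).foldl (fun result i =>
    let coeff_a := PySem.List.pyGetD poly_a i 0
    if coeff_a = 0 then result
    else
      (PySem.List.pyRange 0 size 1).foldl (fun result j =>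
        let coeff_b := PySem.List.pyGetD poly_b j 0
        if coeff_b = 0 then result
        else
          let k := PySem.Int.mod (i + j) size
          let term := coeff_a * coeff_b
          PySem.List.pySetD result k (PySem.Int.mod (PySem.List.pyGetD result k 0 + term) modulus))
        result)
    (List.replicate poly_a.length 0)

-- the 'while current_exponent > 0' loop of A
def pvLoopA (result : List Int) (base : List Int) (current_exponent : Int) (modulus : Int) : List Int :=
  if 0 < current_exponent then
    let result' := if PySem.Int.mod current_exponent 2 = 1
      then modular_polynomial_multiply result base modulus else result
    pvLoopA result' (modular_polynomial_multiply base base modulus)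
      (PySem.Int.floordiv current_exponent 2) modulus
  else result
termination_by current_exponent.toNat
decreasing_by
  have h0 := PySem.Int.floordiv_mul_add_mod current_exponent 2
  have h1 := PySem.Int.mod_nonneg current_exponent (b := 2) (by omega)
  have h2 := PySem.Int.mod_lt current_exponent (b := 2) (by omega)
  omega

def compute_monomial_power (residue : Int) (exponent : Int) (size : Int) (modulus : Int) : List Int :=
  let result := PySem.List.pySetD (List.replicate size.toNat 0) 0 1
  let base0 := PySem.List.pySetD (List.replicate size.toNat 0) 0 1
  let base := PySem.List.pySetD base0 residue (PySem.List.pyGetD base0 residue 0 + 1)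
  pvLoopA result base exponent modulus

-- ===== PORT B =====
def compute_monomial_power_alt (residue : Int) (exponent : Int) (size : Int) (modulus : Int) : List Int :=
  let result := PySem.List.pySetD (List.replicate size.toNat 0) 0 1
  if exponent ≤ 0 then result
  else
    let st := (PySem.List.pyRange 0 (exponent + 1) 1).foldl
      (fun (st : List Int × Int) k =>
        let pos := PySem.Int.mod (k * residue) size
        (PySem.List.pySetD st.1 pos
           (PySem.Int.mod (PySem.List.pyGetD st.1 pos 0 + st.2) modulus),
         PySem.Int.floordiv (st.2 * (exponent - k)) (k + 1)))
      (List.replicate size.toNat 0, 1)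
    st.1

-- ===== PRECONDITION & SPEC =====
-- Pre_ excludes exactly the inputs where A raises: size < 1 (IndexError at result[0]),
-- residue outside [-size, size) (IndexError at base[residue]), and modulus = 0 with
-- exponent > 0 (ZeroDivisionError in the first polynomial multiplication).
def Pre_compute_monomial_power (residue : Int) (exponent : Int) (size : Int) (modulus : Int) : Prop :=
  1 ≤ size ∧ -size ≤ residue ∧ residue < size ∧ (0 < exponent → modulus ≠ 0)
instance (residue : Int) (exponent : Int) (size : Int) (modulus : Int) : Decidable (Pre_compute_monomial_power residue exponent size modulus) := by unfold Pre_compute_monomial_power; infer_instance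
def pvWitness_compute_monomial_power : Int × Int × Int × Int := (1, 3, 2, 5)

def Spec_compute_monomial_power (residue : Int) (exponent : Int) (size : Int) (modulus : Int) (out : List Int) : Prop := out = compute_monomial_power_alt residue exponent size modulus
instance (residue : Int) (exponent : Int) (size : Int) (modulus : Int) (out : List Int) : Decidable (Spec_compute_monomial_power residue exponent size modulus out) := by unfold Spec_compute_monomial_power; infer_instance

-- ===== CLAIM (what is proved, stated in full; the proofs are below) =====
def Claim_equal_compute_monomial_power : Prop := ∀ (residue : Int) (exponent : Int) (size : Int) (modulus : Int), Dom_compute_monomial_power residue exponent size modulus → Pre_compute_monomial_power residue exponent size modulus → Spec_compute_monomial_power residue exponent size modulus (compute_monomial_power residue exponent size modulus)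

-- ===== LEMMAS AND PROOFS =====

-- Python % depends only on the residue class (divisor ≠ 0), and its result is canonical.
def pvInRange (m r : Int) : Prop := (0 < m ∧ 0 ≤ r ∧ r < m) ∨ (m < 0 ∧ m < r ∧ r ≤ 0)

lemma pv_mod_inrange (a m : Int) (hm : m ≠ 0) : pvInRange m (PySem.Int.mod a m) := by
  rcases lt_or_gt_of_ne hm with h | h
  · exact Or.inr ⟨h, (PySem.Int.mod_neg_bounds a h).1, (PySem.Int.mod_neg_bounds a h).2⟩
  · exact Or.inl ⟨h, PySem.Int.mod_nonneg a h, PySem.Int.mod_lt a h⟩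

lemma pv_mod_modeq (a m : Int) : PySem.Int.mod a m ≡ a [ZMOD m] := by
  have h := PySem.Int.floordiv_mul_add_mod a m
  have : m ∣ a - PySem.Int.mod a m := ⟨PySem.Int.floordiv a m, by linarith [mul_comm (PySem.Int.floordiv a m) m]⟩
  exact (Int.modEq_iff_dvd.mpr this)

lemma pv_canon_eq (a m r : Int) (hm : m ≠ 0) (hr : pvInRange m r) (hc : r ≡ a [ZMOD m]) :
    PySem.Int.mod a m = r := by
  have h1 := pv_mod_modeq a m
  have h2 : PySem.Int.mod a m ≡ r [ZMOD m] := h1.trans hc.symm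
  have h3 : m ∣ r - PySem.Int.mod a m := Int.ModEq.dvd h2
  have h4 := pv_mod_inrange a m hm
  obtain ⟨k, hk⟩ := h3
  unfold pvInRange at hr h4
  have hk0 : k = 0 := by
    rcases hr with ⟨hm1, hr1, hr2⟩ | ⟨hm1, hr1, hr2⟩ <;>
      rcases h4 with ⟨hm2, h41, h42⟩ | ⟨hm2, h41, h42⟩ <;>
        [skip; omega; omega; skip] <;>
      · rcases lt_trichotomy k 0 with hks | hks | hks
        · exfalso; nlinarith
        · exact hks
        · exfalso; nlinarith
  rw [hk0, mul_zero] at hk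
  omega
lemma pv_canon_congr (a b m : Int) (hm : m ≠ 0) (hc : a ≡ b [ZMOD m]) :
    PySem.Int.mod a m = PySem.Int.mod b m :=
  (pv_canon_eq b m (PySem.Int.mod a m) hm (pv_mod_inrange a m hm) ((pv_mod_modeq a m).trans hc)).symm

lemma pv_mod_zero (m : Int) (hm : m ≠ 0) : PySem.Int.mod 0 m = 0 := by
  apply pv_canon_eq 0 m 0 hm _ (Int.ModEq.refl 0)
  unfold pvInRange; omega

lemma pv_mod_idem (a m : Int) (hm : m ≠ 0) :
    PySem.Int.mod (PySem.Int.mod a m) m = PySem.Int.mod a m :=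
  pv_canon_eq _ m _ hm (pv_mod_inrange a m hm) (Int.ModEq.refl _)

lemma pv_mod_add_left (a b m : Int) (hm : m ≠ 0) :
    PySem.Int.mod (PySem.Int.mod a m + b) m = PySem.Int.mod (a + b) m :=
  pv_canon_congr _ _ m hm (Int.ModEq.add_right b (pv_mod_modeq a m))

lemma pv_getD_set (xs : List Int) (n t : ℕ) (v : Int) (hn : n < xs.length) :
    (xs.set n v).getD t 0 = if t = n then v else xs.getD t 0 := by
  by_cases h : t = n
  · subst h
    rw [if_pos rfl, List.getD_eq_getElem?_getD, List.getElem?_set_self (by omega)]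
    rfl
  · rw [if_neg h, List.getD_eq_getElem?_getD, List.getD_eq_getElem?_getD,
      List.getElem?_set_ne (by omega)]

-- sums respect congruence
lemma pv_modeq_sum {ι : Type} (t : Finset ι) (f g : ι → ℤ) (m : ℤ)
    (h : ∀ i ∈ t, f i ≡ g i [ZMOD m]) : (∑ i ∈ t, f i) ≡ (∑ i ∈ t, g i) [ZMOD m] := by
  classical
  induction t using Finset.induction_on with
  | empty => simp
  | insert a s ha ih =>
    rw [Finset.sum_insert ha, Finset.sum_insert ha]
    exact Int.ModEq.add (h a (Finset.mem_insert_self a s))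
      (ih fun i hi => h i (Finset.mem_insert_of_mem hi))

-- sum over ZMod s equals sum over range s
lemma pv_sum_univ {M : Type} [AddCommMonoid M] (s : ℕ) [NeZero s] (f : ZMod s → M) :
    (∑ a : ZMod s, f a) = ∑ i ∈ Finset.range s, f (i : ZMod s) := by
  apply Finset.sum_bij' (i := fun (a : ZMod s) (_ : a ∈ Finset.univ) => a.val)
    (j := fun (i : ℕ) (_ : i ∈ Finset.range s) => (i : ZMod s))
  · intro a _; exact Finset.mem_range.mpr (ZMod.val_lt a)
  · intro i _; exact Finset.mem_univ _
  · intro a _; exact ZMod.natCast_zmod_val a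
  · intro i hi; exact ZMod.val_cast_of_lt (Finset.mem_range.mp hi)
  · intro a _; rw [ZMod.natCast_zmod_val a]

lemma pv_cast_eq_iff (s : ℕ) [NeZero s] (i j : ℕ) (hi : i < s) (hj : j < s) :
    ((i : ZMod s) = (j : ZMod s)) ↔ i = j := by
  rw [ZMod.natCast_eq_natCast_iff]
  unfold Nat.ModEq
  rw [Nat.mod_eq_of_lt hi, Nat.mod_eq_of_lt hj]

-- coefficient formula for the group-algebra product
lemma pv_mul_apply (s : ℕ) [NeZero s] (P Q : AddMonoidAlgebra ℤ (ZMod s)) (x : ZMod s) :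
    (P * Q) x = ∑ a : ZMod s, ∑ b : ZMod s, if a + b = x then P a * Q b else 0 := by
  rw [AddMonoidAlgebra.mul_apply]
  rw [Finsupp.sum_fintype _ _ (by intro a; simp)]
  refine Finset.sum_congr rfl fun a _ => ?_
  rw [Finsupp.sum_fintype _ _ (by intro b; simp)]

lemma pv_sum_apply (s : ℕ) [NeZero s] (S : Finset ℕ) (f : ℕ → AddMonoidAlgebra ℤ (ZMod s)) (x : ZMod s) :
    (∑ k ∈ S, f k) x = ∑ k ∈ S, f k x := by
  classical
  induction S using Finset.induction_on with
  | empty => rfl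
  | insert a T ha ih => rw [Finset.sum_insert ha, Finset.sum_insert ha, ← ih]; rfl

-- the integer cyclic-convolution sum A's inner loops accumulate
def pvConv (p q : List Int) (s t : ℕ) : ℤ :=
  ∑ i ∈ Finset.range s, ∑ j ∈ Finset.range s,
    if (i + j) % s = t then p.getD i 0 * q.getD j 0 else 0

-- entrywise congruence of a list with a group-algebra element
def pvRel (m : Int) (s : ℕ) (p : List Int) (P : AddMonoidAlgebra ℤ (ZMod s)) : Prop :=
  p.length = s ∧ ∀ t : ℕ, t < s → p.getD t 0 ≡ P (t : ZMod s) [ZMOD m]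

lemma pv_conv_cong (m : Int) (_hm : m ≠ 0) (s : ℕ) [NeZero s]
    (p q : List Int) (P Q : AddMonoidAlgebra ℤ (ZMod s))
    (hp : pvRel m s p P) (hq : pvRel m s q Q) (t : ℕ) (ht : t < s) :
    pvConv p q s t ≡ (P * Q) (t : ZMod s) [ZMOD m] := by
  have halg : (P * Q) (t : ZMod s)
      = ∑ i ∈ Finset.range s, ∑ j ∈ Finset.range s,
          if (i + j) % s = t then P (i : ZMod s) * Q (j : ZMod s) else 0 := by
    rw [pv_mul_apply, pv_sum_univ]
    refine Finset.sum_congr rfl fun i hi => ?_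
    rw [pv_sum_univ]
    refine Finset.sum_congr rfl fun j hj => ?_
    have hcond : ((i : ZMod s) + (j : ZMod s) = (t : ZMod s)) ↔ ((i + j) % s = t) := by
      rw [← Nat.cast_add, ZMod.natCast_eq_natCast_iff]
      unfold Nat.ModEq
      rw [Nat.mod_eq_of_lt ht]
    by_cases hc : (i + j) % s = t
    · rw [if_pos hc, if_pos (hcond.mpr hc)]
    · rw [if_neg hc, if_neg (fun h => hc (hcond.mp h))]
  rw [halg]
  unfold pvConv
  apply pv_modeq_sum
  intro i hi
  apply pv_modeq_sum
  intro j hj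
  rw [Finset.mem_range] at hi hj
  by_cases hc : (i + j) % s = t
  · rw [if_pos hc, if_pos hc]
    exact Int.ModEq.mul (hp.2 i hi) (hq.2 j hj)
  · rw [if_neg hc, if_neg hc]

lemma pv_inner (m : Int) (hm : m ≠ 0) (q : List Int) (ca : Int) (i s : ℕ)
    (hs : 0 < s) :
    ∀ (jn : ℕ) (res : List Int) (F : ℕ → ℤ), res.length = s →
    (∀ t < s, res.getD t 0 = PySem.Int.mod (F t) m) →
    ((PySem.List.pyRange 0 (jn : Int) 1).foldl (fun result j =>
        let coeff_b := PySem.List.pyGetD q j 0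
        if coeff_b = 0 then result
        else
          let k := PySem.Int.mod ((i : Int) + j) (s : Int)
          let term := ca * coeff_b
          PySem.List.pySetD result k (PySem.Int.mod (PySem.List.pyGetD result k 0 + term) m)) res).length = s ∧
    ∀ t < s, ((PySem.List.pyRange 0 (jn : Int) 1).foldl (fun result j =>
        let coeff_b := PySem.List.pyGetD q j 0
        if coeff_b = 0 then result
        else
          let k := PySem.Int.mod ((i : Int) + j) (s : Int)
          let term := ca * coeff_b
          PySem.List.pySetD result k (PySem.Int.mod (PySem.List.pyGetD result k 0 + term) m)) res).getD t 0
      = PySem.Int.mod (F t + ∑ j ∈ Finset.range jn, (if (i + j) % s = t then ca * q.getD j 0 else 0)) m := by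
  intro jn
  induction jn with
  | zero =>
    intro res F hlen hent
    rw [show ((0:ℕ):Int) = 0 from rfl, PySem.List.pyRange_one_eq_nil (le_refl 0)]
    refine ⟨hlen, fun t ht => ?_⟩
    simpa using hent t ht
  | succ jn ih =>
    intro res F hlen hent
    have hsplit : PySem.List.pyRange 0 (((jn+1:ℕ)) : Int) 1
        = PySem.List.pyRange 0 (jn : Int) 1 ++ [(jn : Int)] := by
      push_cast
      exact PySem.List.pyRange_one_succ_right (by positivity)
    rw [hsplit, List.foldl_append]
    obtain ⟨ihlen, ihent⟩ := ih res F hlen hent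
    simp only [List.foldl_cons, List.foldl_nil]
    generalize hres' : (PySem.List.pyRange 0 (jn : Int) 1).foldl _ res = res' at ihlen ihent
    by_cases hcb : PySem.List.pyGetD q (jn : Int) 0 = 0
    · rw [if_pos hcb]
      refine ⟨ihlen, fun t ht => ?_⟩
      rw [ihent t ht, Finset.sum_range_succ]
      have hq0 : q.getD jn 0 = 0 := by
        rw [← PySem.List.pyGetD_natCast]; exact hcb
      rw [hq0]
      simp
    · rw [if_neg hcb]
      have hcast : ((i : Int) + (jn : Int)) = (((i + jn : ℕ)) : Int) := by push_cast; ring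
      have hpos : (i + jn) % s < s := Nat.mod_lt _ hs
      rw [hcast, PySem.Int.mod_natCast, PySem.List.pySetD_natCast, PySem.List.pyGetD_natCast]
      refine ⟨by simpa using ihlen, fun t ht => ?_⟩
      rw [pv_getD_set res' _ t _ (by omega)]
      by_cases hteq : t = (i + jn) % s
      · rw [if_pos hteq, ihent _ (by omega), pv_mod_add_left _ _ _ hm, Finset.sum_range_succ]
        subst hteq
        rw [if_pos rfl]
        congr 1
        rw [PySem.List.pyGetD_natCast]
        ring
      · rw [if_neg hteq, ihent t ht, Finset.sum_range_succ, if_neg (fun h => hteq h.symm)]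
        ring_nf

def pvRow (p q : List Int) (s i t : ℕ) : ℤ :=
  ∑ j ∈ Finset.range s, if (i + j) % s = t then p.getD i 0 * q.getD j 0 else 0

lemma pv_outer (m : Int) (hm : m ≠ 0) (p q : List Int) (s : ℕ) (hs : 0 < s) :
    ∀ (inn : ℕ) (res : List Int) (F : ℕ → ℤ), res.length = s →
    (∀ t < s, res.getD t 0 = PySem.Int.mod (F t) m) →
    ((PySem.List.pyRange 0 (inn : Int) 1).foldl (fun result i =>
        let coeff_a := PySem.List.pyGetD p i 0
        if coeff_a = 0 then result
        else
          (PySem.List.pyRange 0 (s : Int) 1).foldl (fun result j =>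
            let coeff_b := PySem.List.pyGetD q j 0
            if coeff_b = 0 then result
            else
              let k := PySem.Int.mod (i + j) (s : Int)
              let term := coeff_a * coeff_b
              PySem.List.pySetD result k (PySem.Int.mod (PySem.List.pyGetD result k 0 + term) m))
            result) res).length = s ∧
    ∀ t < s, ((PySem.List.pyRange 0 (inn : Int) 1).foldl (fun result i =>
        let coeff_a := PySem.List.pyGetD p i 0
        if coeff_a = 0 then result
        else
          (PySem.List.pyRange 0 (s : Int) 1).foldl (fun result j =>
            let coeff_b := PySem.List.pyGetD q j 0
            if coeff_b = 0 then result
            else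
              let k := PySem.Int.mod (i + j) (s : Int)
              let term := coeff_a * coeff_b
              PySem.List.pySetD result k (PySem.Int.mod (PySem.List.pyGetD result k 0 + term) m))
            result) res).getD t 0
      = PySem.Int.mod (F t + ∑ i ∈ Finset.range inn, pvRow p q s i t) m := by
  intro inn
  induction inn with
  | zero =>
    intro res F hlen hent
    rw [show ((0:ℕ):Int) = 0 from rfl, PySem.List.pyRange_one_eq_nil (le_refl 0)]
    refine ⟨hlen, fun t ht => ?_⟩
    simpa using hent t ht
  | succ inn ih =>
    intro res F hlen hent
    have hsplit : PySem.List.pyRange 0 (((inn+1:ℕ)) : Int) 1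
        = PySem.List.pyRange 0 (inn : Int) 1 ++ [(inn : Int)] := by
      push_cast
      exact PySem.List.pyRange_one_succ_right (by positivity)
    rw [hsplit, List.foldl_append]
    obtain ⟨ihlen, ihent⟩ := ih res F hlen hent
    simp only [List.foldl_cons, List.foldl_nil]
    generalize hres' : (PySem.List.pyRange 0 (inn : Int) 1).foldl _ res = res' at ihlen ihent
    by_cases hca : PySem.List.pyGetD p (inn : Int) 0 = 0
    · rw [if_pos hca]
      refine ⟨ihlen, fun t ht => ?_⟩
      rw [ihent t ht, Finset.sum_range_succ]
      have hp0 : p.getD inn 0 = 0 := by rw [← PySem.List.pyGetD_natCast]; exact hca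
      unfold pvRow
      rw [hp0]
      simp
    · rw [if_neg hca]
      obtain ⟨hl2, he2⟩ := pv_inner m hm q (PySem.List.pyGetD p (inn : Int) 0) inn s hs s res'
        (fun t => F t + ∑ i ∈ Finset.range inn, pvRow p q s i t) ihlen ihent
      refine ⟨hl2, fun t ht => ?_⟩
      rw [he2 t ht, Finset.sum_range_succ]
      congr 1
      unfold pvRow
      rw [PySem.List.pyGetD_natCast]
      ring_nf

lemma pv_mul_spec (m : Int) (hm : m ≠ 0) (p q : List Int) (s : ℕ) (hs : 0 < s)
    (hp : p.length = s) :
    (modular_polynomial_multiply p q m).length = s ∧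
    ∀ t < s, (modular_polynomial_multiply p q m).getD t 0 = PySem.Int.mod (pvConv p q s t) m := by
  have hinit : ∀ t < s, (List.replicate p.length (0:Int)).getD t 0 = PySem.Int.mod ((fun _ => (0:ℤ)) t) m := by
    intro t ht
    rw [List.getD_eq_getElem?_getD, List.getElem?_replicate]
    simp [pv_mod_zero m hm, hp, ht]
  unfold modular_polynomial_multiply
  simp only [hp]
  obtain ⟨hl, he⟩ := pv_outer m hm p q s hs s (List.replicate s 0) (fun _ => 0)
    (by simp) (by simpa [hp] using hinit)
  refine ⟨hl, fun t ht => ?_⟩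
  rw [he t ht]
  unfold pvConv pvRow
  norm_num

lemma pv_mul_rel (m : Int) (hm : m ≠ 0) (s : ℕ) [NeZero s]
    (p q : List Int) (P Q : AddMonoidAlgebra ℤ (ZMod s))
    (hp : pvRel m s p P) (hq : pvRel m s q Q) :
    pvRel m s (modular_polynomial_multiply p q m) (P * Q) ∧
    ∀ t < s, (modular_polynomial_multiply p q m).getD t 0
      = PySem.Int.mod ((modular_polynomial_multiply p q m).getD t 0) m := by
  have hsp : 0 < s := Nat.pos_of_ne_zero (NeZero.ne s)
  obtain ⟨hl, he⟩ := pv_mul_spec m hm p q s hsp hp.1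
  refine ⟨⟨hl, fun t ht => ?_⟩, fun t ht => ?_⟩
  · rw [he t ht]
    exact (pv_mod_modeq _ m).trans (pv_conv_cong m hm s p q P Q hp hq t ht)
  · rw [he t ht, pv_mod_idem _ m hm]

lemma pv_loopA_spec (m : Int) (hm : m ≠ 0) (s : ℕ) [NeZero s] :
    ∀ (c : ℕ) (cur : Int) (res bas : List Int) (P B : AddMonoidAlgebra ℤ (ZMod s)),
    cur.toNat = c → 0 < cur → pvRel m s res P → pvRel m s bas B →
    pvRel m s (pvLoopA res bas cur m) (P * B ^ cur.toNat) ∧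
    ∀ t < s, (pvLoopA res bas cur m).getD t 0
      = PySem.Int.mod ((pvLoopA res bas cur m).getD t 0) m := by
  intro c
  induction c using Nat.strong_induction_on with
  | _ c ih =>
    intro cur res bas P B hc hcur hres hbas
    have h0 := PySem.Int.floordiv_mul_add_mod cur 2
    have h1 := PySem.Int.mod_nonneg cur (b := 2) (by omega)
    have h2 := PySem.Int.mod_lt cur (b := 2) (by omega)
    rw [pvLoopA, if_pos hcur]
    by_cases hz : PySem.Int.floordiv cur 2 ≤ 0
    · -- cur = 1
      have hcur1 : cur = 1 := by omega
      have hodd : PySem.Int.mod cur 2 = 1 := by omega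
      rw [if_pos hodd, pvLoopA, if_neg (by omega)]
      obtain ⟨hrel, hcanon⟩ := pv_mul_rel m hm s res bas P B hres hbas
      rw [hcur1]
      norm_num
      exact ⟨hrel, hcanon⟩
    · -- recurse
      have hcur' : 0 < PySem.Int.floordiv cur 2 := by omega
      have hlt : (PySem.Int.floordiv cur 2).toNat < c := by omega
      obtain ⟨hbrel, _⟩ := pv_mul_rel m hm s bas bas B B hbas hbas
      by_cases hodd : PySem.Int.mod cur 2 = 1
      · rw [if_pos hodd]
        obtain ⟨hrel', hcanon'⟩ := pv_mul_rel m hm s res bas P B hres hbas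
        obtain ⟨hr, hcan⟩ := ih (PySem.Int.floordiv cur 2).toNat hlt (PySem.Int.floordiv cur 2)
          _ _ (P * B) (B * B) rfl hcur' hrel' hbrel
        refine ⟨?_, hcan⟩
        have hexp : P * B * (B * B) ^ (PySem.Int.floordiv cur 2).toNat = P * B ^ cur.toNat := by
          rw [← pow_two, ← pow_mul, mul_assoc, ← pow_succ']
          congr 2
          omega
        rwa [hexp] at hr
      · rw [if_neg hodd]
        obtain ⟨hr, hcan⟩ := ih (PySem.Int.floordiv cur 2).toNat hlt (PySem.Int.floordiv cur 2)
          _ _ P (B * B) rfl hcur' hres hbrel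
        refine ⟨?_, hcan⟩
        have hexp : P * (B * B) ^ (PySem.Int.floordiv cur 2).toNat = P * B ^ cur.toNat := by
          rw [← pow_two, ← pow_mul]
          congr 2
          omega
        rwa [hexp] at hr

lemma pv_binom (s : ℕ) [NeZero s] (r : ZMod s) (n : ℕ) (x : ZMod s) :
    ((1 + AddMonoidAlgebra.single r (1 : ℤ)) ^ n) x
      = ∑ k ∈ Finset.range (n + 1), (if (k • r : ZMod s) = x then (n.choose k : ℤ) else 0) := by
  rw [add_comm, add_pow]
  have h1 : ∀ k : ℕ,
      (AddMonoidAlgebra.single r (1:ℤ)) ^ k * (1:AddMonoidAlgebra ℤ (ZMod s)) ^ (n - k)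
        * (n.choose k : AddMonoidAlgebra ℤ (ZMod s))
      = AddMonoidAlgebra.single (k • r) ((n.choose k : ℤ)) := by
    intro k
    rw [one_pow, mul_one, AddMonoidAlgebra.single_pow, one_pow,
      AddMonoidAlgebra.natCast_def, AddMonoidAlgebra.single_mul_single]
    simp
  rw [Finset.sum_congr rfl fun k _ => h1 k, pv_sum_apply]
  exact Finset.sum_congr rfl fun k _ => Finsupp.single_apply

lemma pv_bloop (m : Int) (hm : m ≠ 0) (residue : Int) (s : ℕ) (hs : 0 < s) (n : ℕ) :
    ∀ (kn : ℕ), kn ≤ n + 1 →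
    (((PySem.List.pyRange 0 ((kn : ℕ) : Int) 1).foldl
      (fun (st : List Int × Int) k =>
        (PySem.List.pySetD st.1 (PySem.Int.mod (k * residue) ((s : ℕ) : Int))
           (PySem.Int.mod (PySem.List.pyGetD st.1 (PySem.Int.mod (k * residue) ((s : ℕ) : Int)) 0 + st.2) m),
         PySem.Int.floordiv (st.2 * (((n : ℕ) : Int) - k)) (k + 1)))
      (List.replicate s 0, 1)).1.length = s) ∧
    (((PySem.List.pyRange 0 ((kn : ℕ) : Int) 1).foldl
      (fun (st : List Int × Int) k =>
        (PySem.List.pySetD st.1 (PySem.Int.mod (k * residue) ((s : ℕ) : Int))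
           (PySem.Int.mod (PySem.List.pyGetD st.1 (PySem.Int.mod (k * residue) ((s : ℕ) : Int)) 0 + st.2) m),
         PySem.Int.floordiv (st.2 * (((n : ℕ) : Int) - k)) (k + 1)))
      (List.replicate s 0, 1)).2 = (n.choose kn : ℤ)) ∧
    ∀ t < s, ((PySem.List.pyRange 0 ((kn : ℕ) : Int) 1).foldl
      (fun (st : List Int × Int) k =>
        (PySem.List.pySetD st.1 (PySem.Int.mod (k * residue) ((s : ℕ) : Int))
           (PySem.Int.mod (PySem.List.pyGetD st.1 (PySem.Int.mod (k * residue) ((s : ℕ) : Int)) 0 + st.2) m),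
         PySem.Int.floordiv (st.2 * (((n : ℕ) : Int) - k)) (k + 1)))
      (List.replicate s 0, 1)).1.getD t 0
      = PySem.Int.mod (∑ k ∈ Finset.range kn,
          (if PySem.Int.mod ((k : Int) * residue) ((s : ℕ) : Int) = (t : Int)
           then (n.choose k : ℤ) else 0)) m := by
  intro kn
  induction kn with
  | zero =>
    intro _
    rw [show ((0:ℕ):Int) = 0 from rfl, PySem.List.pyRange_one_eq_nil (le_refl 0)]
    refine ⟨by simp, by norm_num, fun t ht => ?_⟩
    rw [List.foldl_nil]
    simp [List.getD_eq_getElem?_getD, ht, pv_mod_zero m hm]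
  | succ kn ih =>
    intro hkn
    obtain ⟨ihlen, ihc, ihent⟩ := ih (by omega)
    have hsplit : PySem.List.pyRange 0 (((kn+1:ℕ)) : Int) 1
        = PySem.List.pyRange 0 (kn : Int) 1 ++ [(kn : Int)] := by
      push_cast
      exact PySem.List.pyRange_one_succ_right (by positivity)
    rw [hsplit, List.foldl_append]
    simp only [List.foldl_cons, List.foldl_nil]
    generalize hst : (PySem.List.pyRange 0 (kn : Int) 1).foldl _ (List.replicate s (0:Int), (1:Int)) = st at ihlen ihc ihent
    have hposb : 0 ≤ PySem.Int.mod ((kn:Int) * residue) ((s:ℕ):Int) ∧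
        PySem.Int.mod ((kn:Int) * residue) ((s:ℕ):Int) < (s:Int) := by
      exact ⟨PySem.Int.mod_nonneg _ (by exact_mod_cast hs), PySem.Int.mod_lt _ (by exact_mod_cast hs)⟩
    set pos := PySem.Int.mod ((kn:Int) * residue) ((s:ℕ):Int) with hposdef
    have hsetd : PySem.List.pySetD st.1 pos (PySem.Int.mod (PySem.List.pyGetD st.1 pos 0 + st.2) m)
        = st.1.set pos.toNat (PySem.Int.mod (st.1.getD pos.toNat 0 + st.2) m) := by
      rw [PySem.List.pySetD_of_nonneg _ _ hposb.1, PySem.List.pyGetD_of_nonneg _ _ hposb.1]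
    refine ⟨?_, ?_, ?_⟩
    · simp [hsetd, ihlen]
    · -- coefficient recurrence
      show PySem.Int.floordiv (st.2 * ((n:Int) - (kn:Int))) ((kn:Int) + 1) = (n.choose (kn+1) : ℤ)
      rw [ihc]
      have hrec : (n.choose kn : ℤ) * ((n:Int) - (kn:Int)) = ((n.choose (kn+1) * (kn+1) : ℕ) : ℤ) := by
        have := Nat.choose_succ_right_eq n kn
        have hsub : ((n - kn : ℕ) : ℤ) = (n:Int) - (kn:Int) := by
          have : kn ≤ n := by omega
          omega
        rw [← hsub]
        exact_mod_cast congrArg (Nat.cast : ℕ → ℤ) this.symm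
      rw [hrec, show ((kn:Int) + 1) = ((kn+1 : ℕ) : Int) by push_cast; ring,
        PySem.Int.floordiv_natCast]
      norm_num
    · intro t ht
      show ((PySem.List.pySetD st.1 pos (PySem.Int.mod (PySem.List.pyGetD st.1 pos 0 + st.2) m))).getD t 0 = _
      rw [hsetd, pv_getD_set st.1 pos.toNat t _ (by omega), Finset.sum_range_succ, ← hposdef]
      by_cases hteq : t = pos.toNat
      · rw [if_pos hteq, if_pos (by omega : pos = ((t:ℕ):Int)), ihent pos.toNat (by omega), ihc,
          pv_mod_add_left _ _ _ hm, hteq]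
      · rw [if_neg hteq, if_neg (by omega : ¬ pos = ((t:ℕ):Int)), ihent t ht]
        norm_num

lemma pv_pyGetD_neg (xs : List Int) (i : Int) (d : Int) (h1 : -(xs.length:Int) ≤ i) (h2 : i < 0) :
    PySem.List.pyGetD xs i d = xs.getD ((xs.length:Int) + i).toNat d := by
  have hk : i = -(((-i).toNat : ℕ) : Int) := by omega
  rw [hk, PySem.List.pyGetD_neg_natCast xs (-i).toNat d (by omega) (by omega)]
  rw [List.getD_eq_getElem _ _ (by omega)]
  congr 1
  omega

lemma pv_pySetD_neg (xs : List Int) (i : Int) (v : Int) (h1 : -(xs.length:Int) ≤ i) (h2 : i < 0) :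
    PySem.List.pySetD xs i v = xs.set ((xs.length:Int) + i).toNat v := by
  unfold PySem.List.pySetD PySem.List.pySet? PySem.List.pyIdx?
  rw [if_neg (by omega), if_pos (by omega)]
  simp only [Option.map_some, Option.getD_some]
  congr 1
  omega

lemma pv_one_apply (s : ℕ) [NeZero s] (t : ℕ) (ht : t < s) :
    (1 : AddMonoidAlgebra ℤ (ZMod s)) ((t : ℕ) : ZMod s) = if t = 0 then 1 else 0 := by
  rw [AddMonoidAlgebra.one_def, Finsupp.single_apply]
  by_cases h : t = 0
  · subst h; norm_num
  · rw [if_neg h, if_neg]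
    intro hc
    exact h ((pv_cast_eq_iff s 0 t (by omega) ht).mp (by exact_mod_cast hc)).symm

lemma pv_b0_getD (s : ℕ) (hs : 0 < s) (t : ℕ) (ht : t < s) :
    (PySem.List.pySetD (List.replicate s (0:Int)) 0 1).getD t 0 = if t = 0 then 1 else 0 := by
  rw [PySem.List.pySetD_of_nonneg _ _ (le_refl 0)]
  rw [pv_getD_set _ _ _ _ (by simpa using hs)]
  have h00 : ((0:Int).toNat) = 0 := rfl
  rw [h00]
  by_cases h : t = 0
  · rw [if_pos h, if_pos h]
  · rw [if_neg h, if_neg h, List.getD_eq_getElem _ _ (by simpa using ht)]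
    simp

lemma pv_b0_len (s : ℕ) : (PySem.List.pySetD (List.replicate s (0:Int)) 0 1).length = s := by
  rw [PySem.List.pySetD_of_nonneg _ _ (le_refl 0)]
  simp

lemma pv_result0_rel (m : Int) (s : ℕ) [NeZero s] (hs : 0 < s) :
    pvRel m s (PySem.List.pySetD (List.replicate s (0:Int)) 0 1) 1 := by
  refine ⟨pv_b0_len s, fun t ht => ?_⟩
  rw [pv_b0_getD s hs t ht, pv_one_apply s t ht]

lemma pv_intCast_eq_natCast (s : ℕ) [NeZero s] (a : Int) (rn : ℕ)
    (h : a ≡ (rn : Int) [ZMOD (s : Int)]) : ((a : ZMod s)) = ((rn : ℕ) : ZMod s) := by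
  have : ((a : ZMod s)) = (((rn : Int) : ZMod s)) := (ZMod.intCast_eq_intCast_iff _ _ _).mpr h
  rw [this]
  push_cast
  rfl

lemma pv_base_rel (m : Int) (s : ℕ) [NeZero s] (hs : 0 < s) (residue : Int)
    (h1 : -(s : Int) ≤ residue) (h2 : residue < (s : Int)) :
    pvRel m s
      (PySem.List.pySetD (PySem.List.pySetD (List.replicate s (0:Int)) 0 1) residue
        (PySem.List.pyGetD (PySem.List.pySetD (List.replicate s (0:Int)) 0 1) residue 0 + 1))
      (1 + AddMonoidAlgebra.single ((residue : ZMod s)) (1 : ℤ)) := by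
  set b0 := PySem.List.pySetD (List.replicate s (0:Int)) 0 1 with hb0
  have hlen : b0.length = s := pv_b0_len s
  -- wrapped index
  obtain ⟨rn, hrn, hridx⟩ : ∃ rn : ℕ, (rn < s ∧ (residue = (rn : Int) ∨ residue = (rn : Int) - (s : Int))) ∧
      PySem.List.pySetD b0 residue (PySem.List.pyGetD b0 residue 0 + 1)
        = b0.set rn (b0.getD rn 0 + 1) := by
    by_cases hneg : residue < 0
    · refine ⟨((s : Int) + residue).toNat, ⟨by omega, Or.inr (by omega)⟩, ?_⟩
      rw [pv_pySetD_neg b0 residue _ (by omega) hneg, pv_pyGetD_neg b0 residue 0 (by omega) hneg, hlen]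
    · refine ⟨residue.toNat, ⟨by omega, Or.inl (by omega)⟩, ?_⟩
      rw [PySem.List.pySetD_of_nonneg _ _ (by omega), PySem.List.pyGetD_of_nonneg _ _ (by omega)]
  have hcast : ((residue : ZMod s)) = ((rn : ℕ) : ZMod s) := by
    apply pv_intCast_eq_natCast
    rcases hrn.2 with h | h
    · rw [h]
    · exact Int.modEq_iff_dvd.mpr ⟨1, by omega⟩
  rw [hridx, hcast]
  refine ⟨by simp [hlen], fun t ht => ?_⟩
  rw [pv_getD_set b0 rn t _ (by omega)]
  have happ : (1 + AddMonoidAlgebra.single (((rn:ℕ) : ZMod s)) (1:ℤ)) ((t : ℕ) : ZMod s)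
      = (if t = 0 then 1 else 0) + (if t = rn then 1 else 0) := by
    have : (1 + AddMonoidAlgebra.single (((rn:ℕ) : ZMod s)) (1:ℤ)) ((t : ℕ) : ZMod s)
        = (1 : AddMonoidAlgebra ℤ (ZMod s)) ((t : ℕ) : ZMod s)
          + (AddMonoidAlgebra.single (((rn:ℕ) : ZMod s)) (1:ℤ)) ((t : ℕ) : ZMod s) := rfl
    rw [this, pv_one_apply s t ht, Finsupp.single_apply]
    congr 1
    by_cases h : t = rn
    · subst h; rw [if_pos rfl, if_pos rfl]
    · rw [if_neg h, if_neg (fun hc => h ((pv_cast_eq_iff s rn t hrn.1 ht).mp hc).symm)]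
  rw [happ]
  have heq : (if t = rn then b0.getD rn 0 + 1 else b0.getD t 0)
      = (if t = 0 then 1 else 0) + (if t = rn then 1 else 0) := by
    by_cases h : t = rn
    · subst h
      rw [if_pos rfl, if_pos rfl, pv_b0_getD s hs t ht]
    · rw [if_neg h, if_neg h, pv_b0_getD s hs t ht]
      try ring
  rw [heq]

lemma pv_cond_iff (s : ℕ) [NeZero s] (hs : 0 < s) (residue : Int) (k t : ℕ) (ht : t < s) :
    (PySem.Int.mod ((k : Int) * residue) ((s : ℕ) : Int) = ((t : ℕ) : Int))
      ↔ ((k • ((residue : ZMod s)) : ZMod s) = ((t : ℕ) : ZMod s)) := by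
  have hsp : (0 : Int) < (s : Int) := by exact_mod_cast hs
  rw [PySem.Int.mod_eq_emod_of_pos hsp]
  have hsmul : (k • ((residue : ZMod s)) : ZMod s) = (((k : Int) * residue : Int) : ZMod s) := by
    rw [nsmul_eq_mul]
    push_cast
    rfl
  have htc : (((t : ℕ)) : ZMod s) = (((t : ℕ) : Int) : ZMod s) := by push_cast; rfl
  rw [hsmul, htc, ZMod.intCast_eq_intCast_iff]
  unfold Int.ModEq
  rw [Int.emod_eq_of_lt (show (0:Int) ≤ ((t:ℕ):Int) by omega) (show ((t:ℕ):Int) < ((s:ℕ):Int) by exact_mod_cast ht)]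

theorem compute_monomial_power_spec : Claim_equal_compute_monomial_power := by
  intro residue exponent size modulus hdom hpre
  obtain ⟨hsz, hr1, hr2, hmz⟩ := hpre
  unfold Spec_compute_monomial_power
  simp only [compute_monomial_power, compute_monomial_power_alt]
  by_cases hexp : exponent ≤ 0
  · rw [pvLoopA, if_neg (by omega), if_pos hexp]
  · rw [if_neg hexp]
    have hm : modulus ≠ 0 := hmz (by omega)
    set s : ℕ := size.toNat with hsdef
    have hs : 0 < s := by omega
    haveI : NeZero s := ⟨by omega⟩
    set n : ℕ := exponent.toNat with hndef
    have hn : 0 < n := by omega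
    have hsize : (size : Int) = ((s : ℕ) : Int) := by omega
    have hexpn : (exponent : Int) = ((n : ℕ) : Int) := by omega
    rw [hsize, hexpn, show ((n : ℕ) : Int) + 1 = (((n+1 : ℕ)) : Int) by push_cast; ring]
    set Bel : AddMonoidAlgebra ℤ (ZMod s) := 1 + AddMonoidAlgebra.single ((residue : ZMod s)) (1 : ℤ) with hBel
    obtain ⟨⟨halen, harel⟩, hacanon⟩ :=
      pv_loopA_spec modulus hm s n ((n : ℕ) : Int)
        (PySem.List.pySetD (List.replicate s (0:Int)) 0 1)
        (PySem.List.pySetD (PySem.List.pySetD (List.replicate s (0:Int)) 0 1) residue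
          (PySem.List.pyGetD (PySem.List.pySetD (List.replicate s (0:Int)) 0 1) residue 0 + 1))
        1 Bel (by omega) (by exact_mod_cast hn)
        (pv_result0_rel modulus s hs)
        (pv_base_rel modulus s hs residue (by omega) (by omega))
    obtain ⟨hblen, -, hbent⟩ := pv_bloop modulus hm residue s hs n (n+1) (le_refl _)
    have hsum : ∀ t : ℕ, t < s →
        (∑ k ∈ Finset.range (n+1),
          (if PySem.Int.mod ((k : Int) * residue) ((s : ℕ) : Int) = ((t:ℕ) : Int)
           then (n.choose k : ℤ) else 0))
        = (Bel ^ n) ((t : ℕ) : ZMod s) := by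
      intro t ht
      rw [hBel, pv_binom s ((residue : ZMod s)) n ((t : ℕ) : ZMod s)]
      refine Finset.sum_congr rfl fun k _ => ?_
      by_cases hc : PySem.Int.mod ((k : Int) * residue) ((s : ℕ) : Int) = ((t:ℕ) : Int)
      · rw [if_pos hc, if_pos ((pv_cond_iff s hs residue k t ht).mp hc)]
      · rw [if_neg hc, if_neg (fun h => hc ((pv_cond_iff s hs residue k t ht).mpr h))]
    apply List.ext_getElem (by rw [halen, hblen])
    intro i hi1 hi2
    have his : i < s := by omega
    rw [← List.getD_eq_getElem _ 0 hi1, ← List.getD_eq_getElem _ 0 hi2,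
      hbent i his, hacanon i his]
    apply pv_canon_congr _ _ _ hm
    have h1 := harel i his
    rw [one_mul, Int.toNat_natCast] at h1
    rw [hsum i his]
    exact h1
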